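-- pv_equiv track=rewrite | github.com/tuneerroy/numberlink | backend/solvers/pyco_solver_edge.py | fix_cycles
-- ===== SOURCE A (Python) =====
-- def fix_cycles(original_puzzle, solution):
--     n = len(solution)
--     visited = [[False for _ in range(n)] for _ in range(n)]
--
--     def dfs(i, j, val):
--         if i < 0 or j < 0 or i >= n or j >= n or visited[i][j] or solution[i][j] != val:
--             return
--         visited[i][j] = True
--         for dx, dy in [(1, 0), (-1, 0), (0, 1), (0, -1)]:
--             dfs(i + dx, j + dy, val)
--
--     for i in range(n):
--         for j in range(n):
--             # we only start search from og puzzle vertex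
--             if not visited[i][j] and original_puzzle[i][j] != 0:
--                 dfs(i, j, solution[i][j])
--
--     # visited[i][j] = False === isolated component that just needs neighbor value
--     for i in range(n):
--         for j in range(n):
--             if visited[i][j]:
--                 continue
--             if i > 0 and visited[i - 1][j]:
--                 solution[i][j] = solution[i - 1][j]
--                 visited[i][j] = True
--             elif j > 0 and visited[i][j - 1]:
--                 solution[i][j] = solution[i][j - 1]
--                 visited[i][j] = True
--     for i in range(n - 1, -1, -1):
--         for j in range(n - 1, -1, -1):
--             if visited[i][j]:
--                 continue
--             if i < n - 1 and visited[i + 1][j]: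
--                 solution[i][j] = solution[i + 1][j]
--                 visited[i][j] = True
--             elif j < n - 1 and visited[i][j + 1]:
--                 solution[i][j] = solution[i][j + 1]
--                 visited[i][j] = True
--
--     return solution
-- ===== SOURCE B (Python) =====
-- def fix_cycles(original_puzzle, solution):
--     # Different algorithm: the visited set is computed as a monotone fixed point
--     # (sweep the grid, marking any cell that is a puzzle seed or has an
--     # equal-valued marked neighbor, until a sweep changes nothing) over a flat
--     # row-major visited array; the patch passes run over the flattened index
--     # with donor helpers.  Like A, mutates `solution` in place and returns it.
--     n = len(solution)
--     total = n * n
--     visited = [False] * total  # flat row-major visited array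
--
--     def reachable(k):
--         i, j = divmod(k, n)
--         if original_puzzle[i][j] != 0:
--             return True
--         v = solution[i][j]
--         if i > 0 and visited[(i - 1) * n + j] and solution[i - 1][j] == v:
--             return True
--         if i + 1 < n and visited[(i + 1) * n + j] and solution[i + 1][j] == v:
--             return True
--         if j > 0 and visited[i * n + (j - 1)] and solution[i][j - 1] == v:
--             return True
--         if j + 1 < n and visited[i * n + (j + 1)] and solution[i][j + 1] == v:
--             return True
--         return False
--
--     changed = True
--     while changed:
--         changed = False
--         for k in range(total):
--             if not visited[k] and reachable(k):
--                 visited[k] = True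
--                 changed = True
--
--     def donor1(k):
--         i, j = divmod(k, n)
--         if i > 0 and visited[(i - 1) * n + j]:
--             return (i - 1, j)
--         if j > 0 and visited[i * n + (j - 1)]:
--             return (i, j - 1)
--         return None
--
--     def donor2(k):
--         i, j = divmod(k, n)
--         if i + 1 < n and visited[(i + 1) * n + j]:
--             return (i + 1, j)
--         if j + 1 < n and visited[i * n + (j + 1)]:
--             return (i, j + 1)
--         return None
--
--     for k in range(total):
--         if not visited[k]:
--             d = donor1(k)
--             if d is not None:
--                 a, b = d
--                 solution[k // n][k % n] = solution[a][b]
--                 visited[k] = True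
--     for k in range(total - 1, -1, -1):
--         if not visited[k]:
--             d = donor2(k)
--             if d is not None:
--                 a, b = d
--                 solution[k // n][k % n] = solution[a][b]
--                 visited[k] = True
--     return solution
-- ===== Notes on version B (the rewrite author's own statement) =====
-- stated objective: alternative
-- what changed: The recursive per-seed DFS flood fill is replaced by a monotone fixed-point computation over a flat row-major visited array (sweep the grid marking any cell that is a puzzle seed or has an equal-valued marked neighbor, until a sweep changes nothing), and both patch passes run over the flattened index with donor helpers instead of nested index loops.
-- outside the precondition, e.g. on fix_cycles([[1, 2], [3]], [[5, 5], [5, 5]]): A returns [[5, 5], [5, 5]], B raises IndexError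
import Mathlib
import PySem

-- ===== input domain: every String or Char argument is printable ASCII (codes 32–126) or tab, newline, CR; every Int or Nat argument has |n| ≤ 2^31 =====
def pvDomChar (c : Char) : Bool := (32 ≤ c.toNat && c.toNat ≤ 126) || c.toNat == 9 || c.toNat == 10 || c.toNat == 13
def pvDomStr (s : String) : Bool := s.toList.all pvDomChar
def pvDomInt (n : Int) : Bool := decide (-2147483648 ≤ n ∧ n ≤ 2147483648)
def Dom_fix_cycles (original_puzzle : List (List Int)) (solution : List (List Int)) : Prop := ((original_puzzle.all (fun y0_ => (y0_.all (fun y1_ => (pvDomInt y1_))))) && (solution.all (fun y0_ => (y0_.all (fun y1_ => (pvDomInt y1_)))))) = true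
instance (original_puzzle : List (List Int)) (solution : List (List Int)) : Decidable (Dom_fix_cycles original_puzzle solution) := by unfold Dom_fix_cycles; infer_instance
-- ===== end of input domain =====

-- B computes the visited set as a monotone fixed point (sweep the grid marking any
-- cell that is a puzzle seed or has an equal-valued marked neighbor, until a sweep
-- changes nothing) over a flat row-major array, instead of A's recursive per-seed
-- DFS, and runs the patch passes over the flattened index with donor helpers; like
-- A, the Python B mutates `solution` in place and returns it — the equivalence
-- proved here is about the returned value.

-- ===== PORT A =====
-- grid accessors (`getD` defaults are never reached inside Pre_)
def gget (g : List (List Int)) (i j : Nat) : Int := (g.getD i []).getD j 0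
def vget (v : List (List Bool)) (i j : Nat) : Bool := (v.getD i []).getD j false
def vset (v : List (List Bool)) (i j : Nat) : List (List Bool) := v.set i ((v.getD i []).set j true)
def sset (g : List (List Int)) (i j : Nat) (x : Int) : List (List Int) := g.set i ((g.getD i []).set j x)

-- A's recursive dfs; the fuel `n*n+1` only makes the recursion total (each
-- guard-passing level marks a fresh cell, so it is never exhausted).
def dfsA (sol : List (List Int)) (n : Nat) (val : Int) : Nat → Int → Int → List (List Bool) → List (List Bool)
  | 0, _, _, v => v
  | f + 1, i, j, v =>
    if i < 0 ∨ j < 0 ∨ (n : Int) ≤ i ∨ (n : Int) ≤ j ∨ vget v i.toNat j.toNat = true ∨ gget sol i.toNat j.toNat ≠ val then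
      v
    else
      dfsA sol n val f i (j - 1)
        (dfsA sol n val f i (j + 1)
          (dfsA sol n val f (i - 1) j
            (dfsA sol n val f (i + 1) j (vset v i.toNat j.toNat))))

-- the two `for i in range(n): for j in range(n)` start loops
def floodA (original_puzzle sol : List (List Int)) (n : Nat) : List (List Bool) :=
  (List.range n).foldl
    (fun v i => (List.range n).foldl
      (fun v j =>
        if vget v i j = false ∧ gget original_puzzle i j ≠ 0 then
          dfsA sol n (gget sol i j) (n * n + 1) (i : Int) (j : Int) v
        else v) v)
    (List.replicate n (List.replicate n false))

def a1body (sv : List (List Int) × List (List Bool)) (i j : Nat) : List (List Int) × List (List Bool) :=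
  if vget sv.2 i j = true then sv
  else if 0 < i ∧ vget sv.2 (i - 1) j = true then (sset sv.1 i j (gget sv.1 (i - 1) j), vset sv.2 i j)
  else if 0 < j ∧ vget sv.2 i (j - 1) = true then (sset sv.1 i j (gget sv.1 i (j - 1)), vset sv.2 i j)
  else sv

def a2body (n : Nat) (sv : List (List Int) × List (List Bool)) (i j : Nat) : List (List Int) × List (List Bool) :=
  if vget sv.2 i j = true then sv
  else if i + 1 < n ∧ vget sv.2 (i + 1) j = true then (sset sv.1 i j (gget sv.1 (i + 1) j), vset sv.2 i j)
  else if j + 1 < n ∧ vget sv.2 i (j + 1) = true then (sset sv.1 i j (gget sv.1 i (j + 1)), vset sv.2 i j)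
  else sv

def pass1A (n : Nat) (sv : List (List Int) × List (List Bool)) : List (List Int) × List (List Bool) :=
  (List.range n).foldl (fun sv i => (List.range n).foldl (fun sv j => a1body sv i j) sv) sv

def pass2A (n : Nat) (sv : List (List Int) × List (List Bool)) : List (List Int) × List (List Bool) :=
  ((List.range n).reverse).foldl (fun sv i => ((List.range n).reverse).foldl (fun sv j => a2body n sv i j) sv) sv

def fix_cycles (original_puzzle : List (List Int)) (solution : List (List Int)) : List (List Int) :=
  let n := solution.length
  (pass2A n (pass1A n (solution, floodA original_puzzle solution n))).1

-- ===== PORT B =====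
-- flat row-major visited array: cell (i, j) lives at index i*n+j
def fj (w : List Bool) (k : Nat) : Bool := w.getD k false

-- B's `reachable(k)`: seed, or an equal-valued already-marked neighbor
def reachB (op sol : List (List Int)) (n : Nat) (w : List Bool) (k : Nat) : Bool :=
  let i := k / n
  let j := k % n
  if gget op i j ≠ 0 then true
  else if 0 < i ∧ fj w ((i - 1) * n + j) = true ∧ gget sol (i - 1) j = gget sol i j then true
  else if i + 1 < n ∧ fj w ((i + 1) * n + j) = true ∧ gget sol (i + 1) j = gget sol i j then true
  else if 0 < j ∧ fj w (i * n + (j - 1)) = true ∧ gget sol i (j - 1) = gget sol i j then true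
  else if j + 1 < n ∧ fj w (i * n + (j + 1)) = true ∧ gget sol i (j + 1) = gget sol i j then true
  else false

-- body of one `for k in range(total)` sweep; the Bool is the `changed` flag
def sweepStep (op sol : List (List Int)) (n : Nat) (p : List Bool × Bool) (k : Nat) : List Bool × Bool :=
  if fj p.1 k = false ∧ reachB op sol n p.1 k = true then (p.1.set k true, true) else p

def sweepB (op sol : List (List Int)) (n total : Nat) (w : List Bool) : List Bool × Bool :=
  (List.range total).foldl (sweepStep op sol n) (w, false)

-- B's `while changed` loop; the fuel `total+1` is a totality guard only (each
-- changing sweep marks at least one new cell)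
def loopB (op sol : List (List Int)) (n total : Nat) : Nat → List Bool → List Bool
  | 0, w => w
  | f + 1, w =>
    if (sweepB op sol n total w).2 = true then
      loopB op sol n total f (sweepB op sol n total w).1
    else w

def donor1B (n : Nat) (w : List Bool) (k : Nat) : Option (Nat × Nat) :=
  let i := k / n
  let j := k % n
  if 0 < i ∧ fj w ((i - 1) * n + j) = true then some (i - 1, j)
  else if 0 < j ∧ fj w (i * n + (j - 1)) = true then some (i, j - 1)
  else none

def donor2B (n : Nat) (w : List Bool) (k : Nat) : Option (Nat × Nat) :=
  let i := k / n
  let j := k % n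
  if i + 1 < n ∧ fj w ((i + 1) * n + j) = true then some (i + 1, j)
  else if j + 1 < n ∧ fj w (i * n + (j + 1)) = true then some (i, j + 1)
  else none

def step1B (n : Nat) (sv : List (List Int) × List Bool) (k : Nat) : List (List Int) × List Bool :=
  if fj sv.2 k = true then sv
  else
    match donor1B n sv.2 k with
    | some (a, b) => (sset sv.1 (k / n) (k % n) (gget sv.1 a b), sv.2.set k true)
    | none => sv

def step2B (n : Nat) (sv : List (List Int) × List Bool) (k : Nat) : List (List Int) × List Bool :=
  if fj sv.2 k = true then sv
  else
    match donor2B n sv.2 k with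
    | some (a, b) => (sset sv.1 (k / n) (k % n) (gget sv.1 a b), sv.2.set k true)
    | none => sv

def fix_cycles_alt (original_puzzle : List (List Int)) (solution : List (List Int)) : List (List Int) :=
  let n := solution.length
  let total := n * n
  let w := loopB original_puzzle solution n total (total + 1) (List.replicate total false)
  let sv1 := (List.range total).foldl (step1B n) (solution, w)
  (((List.range total).reverse).foldl (step2B n) sv1).1

-- ===== PRECONDITION & SPEC =====
-- Pre_ excludes inputs on which the Python A raises IndexError (puzzle or solution rows
-- too short for the n×n scans, n = len(solution)).  It is marginally narrower than A's
-- exact domain: A skips reading puzzle cells that were already flooded, so it can return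
-- on some ragged puzzles Pre_ rejects, where B's sweep (which re-reads every unvisited
-- cell) raises IndexError (see claim.json "cites").
def Pre_fix_cycles (original_puzzle : List (List Int)) (solution : List (List Int)) : Prop :=
  solution.length ≤ original_puzzle.length ∧
  (∀ r ∈ original_puzzle.take solution.length, solution.length ≤ r.length) ∧
  (∀ r ∈ solution, solution.length ≤ r.length)
instance (original_puzzle : List (List Int)) (solution : List (List Int)) : Decidable (Pre_fix_cycles original_puzzle solution) := by unfold Pre_fix_cycles; infer_instance

def pvWitness_fix_cycles : List (List Int) × List (List Int) := ([[1, 0], [0, 0]], [[1, 1], [2, 2]])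

def Spec_fix_cycles (original_puzzle : List (List Int)) (solution : List (List Int)) (out : List (List Int)) : Prop := out = fix_cycles_alt original_puzzle solution
instance (original_puzzle : List (List Int)) (solution : List (List Int)) (out : List (List Int)) : Decidable (Spec_fix_cycles original_puzzle solution out) := by unfold Spec_fix_cycles; infer_instance

-- ===== CLAIM (what is proved, stated in full; the proofs are below) =====
def Claim_equal_fix_cycles : Prop := ∀ (original_puzzle : List (List Int)) (solution : List (List Int)), Dom_fix_cycles original_puzzle solution → Pre_fix_cycles original_puzzle solution → Spec_fix_cycles original_puzzle solution (fix_cycles original_puzzle solution)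

-- ===== LEMMAS AND PROOFS =====

-- ---- basic grid/visited lemmas ----
def Shaped (n : Nat) (v : List (List Bool)) : Prop :=
  v.length = n ∧ ∀ k, k < n → (v.getD k []).length = n

def fc (n : Nat) (v : List (List Bool)) : Nat :=
  ((Finset.range n ×ˢ Finset.range n).filter (fun p => vget v p.1 p.2 = false)).card

theorem getD_set_ne {α : Type} (l : List α) (i : Nat) (x : α) (b : Nat) (d : α) (h : b ≠ i) :
    (l.set i x).getD b d = l.getD b d := by
  simp [List.getD_eq_getElem?_getD, List.getElem?_set_ne (Ne.symm h)]

theorem getD_set_self {α : Type} (l : List α) (i : Nat) (x : α) (d : α) (h : i < l.length) :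
    (l.set i x).getD i d = x := by
  simp [List.getD_eq_getElem?_getD, List.getElem?_set_self h]

theorem vget_vset_ne (v : List (List Bool)) (i j a b : Nat) (h : a ≠ i ∨ b ≠ j) :
    vget (vset v i j) a b = vget v a b := by
  unfold vget vset
  by_cases hai : a = i
  · subst hai
    have hbj : b ≠ j := h.resolve_left (by simp)
    by_cases hl : a < v.length
    · rw [getD_set_self _ _ _ _ hl, getD_set_ne _ _ _ _ _ hbj]
    · rw [List.set_eq_of_length_le (by omega)]
  · rw [getD_set_ne _ _ _ _ _ hai]

theorem vget_vset_self (v : List (List Bool)) (i j : Nat)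
    (hi : i < v.length) (hj : j < (v.getD i []).length) :
    vget (vset v i j) i j = true := by
  unfold vget vset
  rw [getD_set_self _ _ _ _ hi, getD_set_self _ _ _ _ hj]

theorem vget_vset_true (v : List (List Bool)) (i j a b : Nat) (h : vget v a b = true) :
    vget (vset v i j) a b = true := by
  by_cases hab : a = i ∧ b = j
  · obtain ⟨rfl, rfl⟩ := hab
    have hj : b < (v.getD a []).length := by
      by_contra hc
      rw [vget, List.getD_eq_getElem?_getD, List.getElem?_eq_none (by omega)] at h
      simp at h
    have hi : a < v.length := by
      by_contra hc
      have he : v.getD a [] = [] := by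
        rw [List.getD_eq_getElem?_getD, List.getElem?_eq_none (by omega)]; rfl
      rw [he] at hj; simp at hj
    rw [vget_vset_self v a b hi hj]
  · rw [vget_vset_ne v i j a b (by tauto), h]

theorem vget_vset_inv (v : List (List Bool)) (i j a b : Nat)
    (h : vget (vset v i j) a b = true) : vget v a b = true ∨ (a = i ∧ b = j) := by
  by_cases hab : a = i ∧ b = j
  · exact Or.inr hab
  · rw [vget_vset_ne v i j a b (by tauto)] at h
    exact Or.inl h

theorem shaped_vset (n : Nat) (v : List (List Bool)) (i j : Nat) (h : Shaped n v) :
    Shaped n (vset v i j) := by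
  obtain ⟨hl, hr⟩ := h
  refine ⟨by simp [vset, hl], fun k hk => ?_⟩
  unfold vset
  by_cases hki : k = i
  · subst hki
    rw [getD_set_self _ _ _ _ (by omega), List.length_set]
    exact hr k hk
  · rw [getD_set_ne _ _ _ _ _ hki]
    exact hr k hk

theorem fc_vset_le (n : Nat) (v : List (List Bool)) (i j : Nat) :
    fc n (vset v i j) ≤ fc n v := by
  apply Finset.card_le_card
  intro p hp
  rw [Finset.mem_filter] at hp ⊢
  refine ⟨hp.1, ?_⟩
  obtain ⟨_, hfalse⟩ := hp
  by_contra hc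
  have ht : vget v p.1 p.2 = true := by
    cases hv : vget v p.1 p.2
    · exact absurd hv hc
    · rfl
  have := vget_vset_true v i j p.1 p.2 ht
  rw [this] at hfalse; exact absurd hfalse (by simp)

theorem fc_vset_lt (n : Nat) (v : List (List Bool)) (i j : Nat) (h : Shaped n v)
    (hi : i < n) (hj : j < n) (hv : vget v i j = false) :
    fc n (vset v i j) < fc n v := by
  apply Finset.card_lt_card
  constructor
  · intro p hp
    rw [Finset.mem_filter] at hp ⊢
    refine ⟨hp.1, ?_⟩
    obtain ⟨_, hfalse⟩ := hp
    by_contra hc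
    have ht : vget v p.1 p.2 = true := by
      cases hvv : vget v p.1 p.2
      · exact absurd hvv hc
      · rfl
    have := vget_vset_true v i j p.1 p.2 ht
    rw [this] at hfalse; exact absurd hfalse (by simp)
  · intro hsub
    have hmem : (i, j) ∈ (Finset.range n ×ˢ Finset.range n).filter (fun p => vget v p.1 p.2 = false) := by
      simp [Finset.mem_filter, Finset.mem_product, hi, hj, hv]
    have := hsub hmem
    rw [Finset.mem_filter] at this
    have hset : vget (vset v i j) i j = true :=
      vget_vset_self v i j (by rw [h.1]; omega) (by rw [h.2 i hi]; omega)
    rw [hset] at this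
    exact absurd this.2 (by simp)

theorem fc_le_sq (n : Nat) (v : List (List Bool)) : fc n v ≤ n * n := by
  calc fc n v ≤ (Finset.range n ×ˢ Finset.range n).card := Finset.card_filter_le _ _
  _ = n * n := by simp [Finset.card_product]

theorem shaped_replicate (n : Nat) : Shaped n (List.replicate n (List.replicate n false)) := by
  refine ⟨by simp, fun k hk => ?_⟩
  rw [List.getD_eq_getElem?_getD, List.getElem?_replicate_of_lt (by omega)]
  simp

theorem vget_replicate (n a b : Nat) :
    vget (List.replicate n (List.replicate n false)) a b = false := by
  unfold vget
  have hrow : (List.replicate n (List.replicate n false)).getD a [] = List.replicate n false ∨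
      (List.replicate n (List.replicate n false)).getD a [] = [] := by
    rcases Nat.lt_or_ge a n with h | h
    · left
      rw [List.getD_eq_getElem?_getD]
      simp [List.getElem?_replicate, h]
    · right
      rw [List.getD_eq_getElem?_getD, List.getElem?_eq_none (by simpa using h)]
      rfl
  rcases hrow with h1 | h1 <;> rw [h1]
  · rcases Nat.lt_or_ge b n with h | h
    · rw [List.getD_eq_getElem?_getD]
      simp [List.getElem?_replicate, h]
    · rw [List.getD_eq_getElem?_getD, List.getElem?_eq_none (by simpa using h)]
      rfl
  · rfl

theorem dfsA_shaped (sol : List (List Int)) (n : Nat) (val : Int) :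
    ∀ (f : Nat) (i j : Int) (v : List (List Bool)), Shaped n v → Shaped n (dfsA sol n val f i j v) := by
  intro f
  induction f with
  | zero => intro i j v h; exact h
  | succ f ih =>
    intro i j v h
    rw [dfsA]
    split
    · exact h
    · exact ih _ _ _ (ih _ _ _ (ih _ _ _ (ih _ _ _ (shaped_vset n v _ _ h))))

theorem dfsA_fc_le (sol : List (List Int)) (n : Nat) (val : Int) :
    ∀ (f : Nat) (i j : Int) (v : List (List Bool)), fc n (dfsA sol n val f i j v) ≤ fc n v := by
  intro f
  induction f with
  | zero => intro i j v; exact le_refl _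
  | succ f ih =>
    intro i j v
    rw [dfsA]
    split
    · exact le_refl _
    · calc fc n (dfsA sol n val f i (j - 1) (dfsA sol n val f i (j + 1) (dfsA sol n val f (i - 1) j (dfsA sol n val f (i + 1) j (vset v i.toNat j.toNat)))))
          ≤ fc n (dfsA sol n val f i (j + 1) (dfsA sol n val f (i - 1) j (dfsA sol n val f (i + 1) j (vset v i.toNat j.toNat)))) := ih _ _ _
        _ ≤ fc n (dfsA sol n val f (i - 1) j (dfsA sol n val f (i + 1) j (vset v i.toNat j.toNat))) := ih _ _ _
        _ ≤ fc n (dfsA sol n val f (i + 1) j (vset v i.toNat j.toNat)) := ih _ _ _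
        _ ≤ fc n (vset v i.toNat j.toNat) := ih _ _ _
        _ ≤ fc n v := fc_vset_le n v _ _

theorem dfs_mono (sol : List (List Int)) (n : Nat) (val : Int) :
    ∀ (f : Nat) (i j : Int) (v : List (List Bool)) (a b : Nat),
      vget v a b = true → vget (dfsA sol n val f i j v) a b = true := by
  intro f
  induction f with
  | zero => intro i j v a b h; exact h
  | succ f ih =>
    intro i j v a b h
    rw [dfsA]
    split
    · exact h
    · exact ih _ _ _ _ _ (ih _ _ _ _ _ (ih _ _ _ _ _ (ih _ _ _ _ _ (vget_vset_true v _ _ a b h))))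

theorem dfs_marks (sol : List (List Int)) (n : Nat) (val : Int) (f : Nat) (i j : Int)
    (v : List (List Bool)) (hsh : Shaped n v)
    (h0i : 0 ≤ i) (h0j : 0 ≤ j) (hin : i < (n : Int)) (hjn : j < (n : Int))
    (hsol : gget sol i.toNat j.toNat = val) :
    vget (dfsA sol n val (f + 1) i j v) i.toNat j.toNat = true := by
  rw [dfsA]
  split
  · rename_i hg
    rcases hg with h | h | h | h | h | h
    · omega
    · omega
    · omega
    · omega
    · exact h
    · exact absurd hsol h
  · apply dfs_mono; apply dfs_mono; apply dfs_mono; apply dfs_mono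
    exact vget_vset_self v _ _ (by rw [hsh.1]; omega) (by rw [hsh.2 _ (by omega)]; omega)

-- ---- the closure predicate both flood fills are characterized by ----
def Adj (a b c d : Nat) : Prop :=
  (c = a + 1 ∧ d = b) ∨ (c + 1 = a ∧ d = b) ∨ (c = a ∧ d = b + 1) ∨ (c = a ∧ d + 1 = b)

def JustP (op sol : List (List Int)) (n : Nat) (P : Nat → Nat → Prop) (i j : Nat) : Prop :=
  gget op i j ≠ 0 ∨
  (0 < i ∧ P (i - 1) j ∧ gget sol (i - 1) j = gget sol i j) ∨
  (i + 1 < n ∧ P (i + 1) j ∧ gget sol (i + 1) j = gget sol i j) ∨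
  (0 < j ∧ P i (j - 1) ∧ gget sol i (j - 1) = gget sol i j) ∨
  (j + 1 < n ∧ P i (j + 1) ∧ gget sol i (j + 1) = gget sol i j)

def ClosedP (op sol : List (List Int)) (n : Nat) (P : Nat → Nat → Prop) : Prop :=
  ∀ i j, i < n → j < n → JustP op sol n P i j → P i j

-- ---- A's dfs: every marked cell is derivable (minimality) ----
theorem dfs_min (op sol : List (List Int)) (n : Nat) (val : Int)
    (P : Nat → Nat → Prop) (hC : ClosedP op sol n P) :
    ∀ (f : Nat) (i j : Int) (v : List (List Bool)),
      (∀ a b, a < n → b < n → vget v a b = true → P a b) →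
      ((0 ≤ i ∧ 0 ≤ j ∧ i < (n : Int) ∧ j < (n : Int) ∧ gget sol i.toNat j.toNat = val) →
        JustP op sol n P i.toNat j.toNat) →
      ∀ a b, a < n → b < n → vget (dfsA sol n val f i j v) a b = true → P a b := by
  intro f
  induction f with
  | zero => intro i j v hI _ a b ha hb h; exact hI a b ha hb h
  | succ f ih =>
    intro i j v hI hJ a b ha hb h
    rw [dfsA] at h
    split at h
    · exact hI a b ha hb h
    · rename_i hg
      push_neg at hg
      obtain ⟨h1, h2, h3, h4, h5, h6⟩ := hg
      have hiN : i.toNat < n := by omega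
      have hjN : j.toNat < n := by omega
      have hP0 : P i.toNat j.toNat :=
        hC _ _ hiN hjN (hJ ⟨by omega, by omega, by omega, by omega, h6⟩)
      have hI1 : ∀ a b, a < n → b < n → vget (vset v i.toNat j.toNat) a b = true → P a b := by
        intro a b ha hb hv
        rcases vget_vset_inv v _ _ a b hv with hv' | ⟨rfl, rfl⟩
        · exact hI a b ha hb hv'
        · exact hP0
      have hI2 := ih (i + 1) j _ hI1 (by
        rintro ⟨c1, c2, c3, c4, c5⟩
        have e1 : (i + 1).toNat = i.toNat + 1 := by omega
        refine Or.inr (Or.inl ?_)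
        rw [e1]
        refine ⟨by omega, by simpa using hP0, ?_⟩
        simp only [Nat.add_sub_cancel]
        rw [h6, ← e1, c5])
      have hI3 := ih (i - 1) j _ hI2 (by
        rintro ⟨c1, c2, c3, c4, c5⟩
        have e2 : (i - 1).toNat + 1 = i.toNat := by omega
        refine Or.inr (Or.inr (Or.inl ?_))
        rw [e2]
        exact ⟨by omega, hP0, by rw [h6, c5]⟩)
      have hI4 := ih i (j + 1) _ hI3 (by
        rintro ⟨c1, c2, c3, c4, c5⟩
        have e1 : (j + 1).toNat = j.toNat + 1 := by omega
        refine Or.inr (Or.inr (Or.inr (Or.inl ?_)))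
        rw [e1]
        refine ⟨by omega, by simpa using hP0, ?_⟩
        simp only [Nat.add_sub_cancel]
        rw [h6, ← e1, c5])
      have hI5 := ih i (j - 1) _ hI4 (by
        rintro ⟨c1, c2, c3, c4, c5⟩
        have e2 : (j - 1).toNat + 1 = j.toNat := by omega
        refine Or.inr (Or.inr (Or.inr (Or.inr ?_)))
        rw [e2]
        exact ⟨by omega, hP0, by rw [h6, c5]⟩)
      exact hI5 a b ha hb h

-- ---- A's dfs: the marked region is closed under equal-valued adjacency ----
theorem dfs_post (sol : List (List Int)) (n : Nat) (val : Int) :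
    ∀ (f : Nat) (i j : Int) (v : List (List Bool)), Shaped n v → fc n v < f →
      ∀ a b : Nat, a < n → b < n → vget (dfsA sol n val f i j v) a b = true →
        vget v a b = true ∨
        (gget sol a b = val ∧ ∀ c d : Nat, c < n → d < n → Adj a b c d → gget sol c d = val →
          vget (dfsA sol n val f i j v) c d = true) := by
  intro f
  induction f with
  | zero => intro i j v _ hfc; omega
  | succ f ih =>
    intro i j v hsh hfc a b ha hb h
    rw [dfsA] at h ⊢
    split at h
    · rename_i hg
      rw [if_pos hg]
      exact Or.inl h
    · rename_i hg
      rw [if_neg hg]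
      push_neg at hg
      obtain ⟨h1, h2, h3, h4, h5, h6⟩ := hg
      have h5' : vget v i.toNat j.toNat = false := by
        cases hvv : vget v i.toNat j.toNat
        · rfl
        · exact absurd hvv h5
      have hiN : i.toNat < n := by omega
      have hjN : j.toNat < n := by omega
      have hsh1 : Shaped n (vset v i.toNat j.toNat) := shaped_vset n v _ _ hsh
      have hfc1 : fc n (vset v i.toNat j.toNat) < f := by
        have := fc_vset_lt n v i.toNat j.toNat hsh hiN hjN h5'
        omega
      have hsh2 : Shaped n (dfsA sol n val f (i + 1) j (vset v i.toNat j.toNat)) :=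
        dfsA_shaped sol n val f _ _ _ hsh1
      have hfc2 : fc n (dfsA sol n val f (i + 1) j (vset v i.toNat j.toNat)) < f :=
        lt_of_le_of_lt (dfsA_fc_le sol n val f _ _ _) hfc1
      have hsh3 : Shaped n (dfsA sol n val f (i - 1) j
          (dfsA sol n val f (i + 1) j (vset v i.toNat j.toNat))) :=
        dfsA_shaped sol n val f _ _ _ hsh2
      have hfc3 : fc n (dfsA sol n val f (i - 1) j
          (dfsA sol n val f (i + 1) j (vset v i.toNat j.toNat))) < f :=
        lt_of_le_of_lt (dfsA_fc_le sol n val f _ _ _) hfc2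
      have hsh4 : Shaped n (dfsA sol n val f i (j + 1) (dfsA sol n val f (i - 1) j
          (dfsA sol n val f (i + 1) j (vset v i.toNat j.toNat)))) :=
        dfsA_shaped sol n val f _ _ _ hsh3
      have hfc4 : fc n (dfsA sol n val f i (j + 1) (dfsA sol n val f (i - 1) j
          (dfsA sol n val f (i + 1) j (vset v i.toNat j.toNat)))) < f :=
        lt_of_le_of_lt (dfsA_fc_le sol n val f _ _ _) hfc3
      obtain ⟨f', rfl⟩ : ∃ f', f = f' + 1 := ⟨f - 1, by omega⟩
      -- every in-range equal-valued neighbor of (i, j) ends up marked in the final state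
      have hnbr : ∀ c d : Nat, c < n → d < n → Adj i.toNat j.toNat c d → gget sol c d = val →
          vget (dfsA sol n val (f' + 1) i (j - 1)
            (dfsA sol n val (f' + 1) i (j + 1)
              (dfsA sol n val (f' + 1) (i - 1) j
                (dfsA sol n val (f' + 1) (i + 1) j (vset v i.toNat j.toNat))))) c d = true := by
        intro c d hc hd hadj hsolcd
        rcases hadj with ⟨hc1, hd1⟩ | ⟨hc1, hd1⟩ | ⟨hc1, hd1⟩ | ⟨hc1, hd1⟩
        · -- c = i.toNat + 1 : handled by the (i+1, j) child
          have hct : (i + 1).toNat = c := by omega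
          have hdt : j.toNat = d := by omega
          have hmark := dfs_marks sol n val f' (i + 1) j (vset v i.toNat j.toNat) hsh1
            (by omega) (by omega) (by omega) (by omega)
            (by rw [hct, hdt]; exact hsolcd)
          refine dfs_mono sol n val _ _ _ _ _ _
            (dfs_mono sol n val _ _ _ _ _ _ (dfs_mono sol n val _ _ _ _ _ _ ?_))
          rw [← hct, ← hdt]
          exact hmark
        · -- c + 1 = i.toNat : handled by the (i-1, j) child
          have hct : (i - 1).toNat = c := by omega
          have hdt : j.toNat = d := by omega
          have hmark := dfs_marks sol n val f' (i - 1) j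
            (dfsA sol n val (f' + 1) (i + 1) j (vset v i.toNat j.toNat)) hsh2
            (by omega) (by omega) (by omega) (by omega)
            (by rw [hct, hdt]; exact hsolcd)
          refine dfs_mono sol n val _ _ _ _ _ _ (dfs_mono sol n val _ _ _ _ _ _ ?_)
          rw [← hct, ← hdt]
          exact hmark
        · -- d = j.toNat + 1 : handled by the (i, j+1) child
          have hct : i.toNat = c := by omega
          have hdt : (j + 1).toNat = d := by omega
          have hmark := dfs_marks sol n val f' i (j + 1)
            (dfsA sol n val (f' + 1) (i - 1) j
              (dfsA sol n val (f' + 1) (i + 1) j (vset v i.toNat j.toNat))) hsh3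
            (by omega) (by omega) (by omega) (by omega)
            (by rw [hct, hdt]; exact hsolcd)
          refine dfs_mono sol n val _ _ _ _ _ _ ?_
          rw [← hct, ← hdt]
          exact hmark
        · -- d + 1 = j.toNat : handled by the (i, j-1) child
          have hct : i.toNat = c := by omega
          have hdt : (j - 1).toNat = d := by omega
          have hmark := dfs_marks sol n val f' i (j - 1)
            (dfsA sol n val (f' + 1) i (j + 1)
              (dfsA sol n val (f' + 1) (i - 1) j
                (dfsA sol n val (f' + 1) (i + 1) j (vset v i.toNat j.toNat)))) hsh4
            (by omega) (by omega) (by omega) (by omega)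
            (by rw [hct, hdt]; exact hsolcd)
          rw [← hct, ← hdt]
          exact hmark
      -- now locate where (a, b) was first marked
      by_cases hv0 : vget v a b = true
      · exact Or.inl hv0
      right
      by_cases hb1 : vget (vset v i.toNat j.toNat) a b = true
      · rcases vget_vset_inv v _ _ a b hb1 with hv' | ⟨rfl, rfl⟩
        · exact absurd hv' hv0
        · exact ⟨h6, hnbr⟩
      by_cases hb2 : vget (dfsA sol n val (f' + 1) (i + 1) j (vset v i.toNat j.toNat)) a b = true
      · rcases ih (i + 1) j _ hsh1 hfc1 a b ha hb hb2 with hv' | ⟨hs, hn⟩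
        · exact absurd hv' hb1
        · refine ⟨hs, fun c d hc hd hadj hscd => ?_⟩
          exact dfs_mono sol n val _ _ _ _ _ _
            (dfs_mono sol n val _ _ _ _ _ _
              (dfs_mono sol n val _ _ _ _ _ _ (hn c d hc hd hadj hscd)))
      by_cases hb3 : vget (dfsA sol n val (f' + 1) (i - 1) j
          (dfsA sol n val (f' + 1) (i + 1) j (vset v i.toNat j.toNat))) a b = true
      · rcases ih (i - 1) j _ hsh2 hfc2 a b ha hb hb3 with hv' | ⟨hs, hn⟩
        · exact absurd hv' hb2
        · refine ⟨hs, fun c d hc hd hadj hscd => ?_⟩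
          exact dfs_mono sol n val _ _ _ _ _ _
            (dfs_mono sol n val _ _ _ _ _ _ (hn c d hc hd hadj hscd))
      by_cases hb4 : vget (dfsA sol n val (f' + 1) i (j + 1) (dfsA sol n val (f' + 1) (i - 1) j
          (dfsA sol n val (f' + 1) (i + 1) j (vset v i.toNat j.toNat)))) a b = true
      · rcases ih i (j + 1) _ hsh3 hfc3 a b ha hb hb4 with hv' | ⟨hs, hn⟩
        · exact absurd hv' hb3
        · refine ⟨hs, fun c d hc hd hadj hscd => ?_⟩
          exact dfs_mono sol n val _ _ _ _ _ _ (hn c d hc hd hadj hscd)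
      · rcases ih i (j - 1) _ hsh4 hfc4 a b ha hb h with hv' | ⟨hs, hn⟩
        · exact absurd hv' hb4
        · exact ⟨hs, hn⟩

-- ---- generic fold helpers ----
theorem foldl_inv {α β : Type} (Inv : β → Prop) (f : β → α → β)
    (h : ∀ b a, Inv b → Inv (f b a)) :
    ∀ (l : List α) (b : β), Inv b → Inv (l.foldl f b) := by
  intro l
  induction l with
  | nil => intro b hb; exact hb
  | cons a t ih => intro b hb; exact ih _ (h b a hb)

theorem foldl_inv_mem {α β : Type} (Inv : β → Prop) (f : β → α → β) :
    ∀ (l : List α), (∀ b a, a ∈ l → Inv b → Inv (f b a)) →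
      ∀ (b : β), Inv b → Inv (l.foldl f b) := by
  intro l
  induction l with
  | nil => intro _ b hb; exact hb
  | cons a t ih =>
    intro h b hb
    exact ih (fun b x hx => h b x (List.mem_cons_of_mem a hx)) _ (h b a List.mem_cons_self hb)

theorem foldl_pres {α β : Type} (Inv Q : β → Prop) (f : β → α → β)
    (hInv : ∀ b a, Inv b → Inv (f b a)) (hQ : ∀ b a, Inv b → Q b → Q (f b a)) :
    ∀ (l : List α) (b : β), Inv b → Q b → Q (l.foldl f b) := by
  intro l
  induction l with
  | nil => intro b _ hq; exact hq
  | cons a t ih => intro b hb hq; exact ih _ (hInv b a hb) (hQ b a hb hq)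

theorem foldl_estab {α β : Type} (Inv Q : β → Prop) (f : β → α → β) (a : α)
    (hInv : ∀ b x, Inv b → Inv (f b x)) (hQ : ∀ b x, Inv b → Q b → Q (f b x))
    (hE : ∀ b, Inv b → Q (f b a)) :
    ∀ (l : List α) (b : β), a ∈ l → Inv b → Q (l.foldl f b) := by
  intro l
  induction l with
  | nil => intro b hm; exact absurd hm (by simp)
  | cons x t ih =>
    intro b hm hb
    rcases List.mem_cons.mp hm with rfl | hm'
    · exact foldl_pres Inv Q f hInv hQ t _ (hInv b a hb) (hE b hb)
    · exact ih _ hm' (hInv b x hb)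

theorem foldl_rel {α β γ : Type} (R : β → γ → Prop) (f : β → α → β) (g : γ → α → γ) :
    ∀ (l : List α), (∀ b c a, a ∈ l → R b c → R (f b a) (g c a)) →
      ∀ (b : β) (c : γ), R b c → R (l.foldl f b) (l.foldl g c) := by
  intro l
  induction l with
  | nil => intro _ b c h; exact h
  | cons a t ih =>
    intro h b c hr
    exact ih (fun b c x hx => h b c x (List.mem_cons_of_mem a hx)) _ _
      (h b c a List.mem_cons_self hr)

theorem foldl_congr_mem' {α β : Type} (f g : β → α → β) :
    ∀ (l : List α), (∀ b a, a ∈ l → f b a = g b a) → ∀ (b : β), l.foldl f b = l.foldl g b := by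
  intro l
  induction l with
  | nil => intro _ b; rfl
  | cons a t ih =>
    intro h b
    simp only [List.foldl_cons]
    rw [h b a List.mem_cons_self]
    exact ih (fun b x hx => h b x (List.mem_cons_of_mem a hx)) _

-- ---- A's flood phase: shape, seeds, closure, minimality ----
def stepA (op sol : List (List Int)) (n : Nat) (v : List (List Bool)) (i j : Nat) : List (List Bool) :=
  if vget v i j = false ∧ gget op i j ≠ 0 then
    dfsA sol n (gget sol i j) (n * n + 1) (i : Int) (j : Int) v
  else v

theorem floodA_eq (op sol : List (List Int)) (n : Nat) :
    floodA op sol n = (List.range n).foldl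
      (fun v i => (List.range n).foldl (fun v j => stepA op sol n v i j) v)
      (List.replicate n (List.replicate n false)) := rfl

theorem stepA_shaped (op sol : List (List Int)) (n : Nat) (v : List (List Bool)) (i j : Nat)
    (hv : Shaped n v) : Shaped n (stepA op sol n v i j) := by
  unfold stepA
  split
  · exact dfsA_shaped sol n _ _ _ _ _ hv
  · exact hv

theorem stepA_mono (op sol : List (List Int)) (n : Nat) (v : List (List Bool)) (i j a b : Nat)
    (hq : vget v a b = true) : vget (stepA op sol n v i j) a b = true := by
  unfold stepA
  split
  · exact dfs_mono sol n _ _ _ _ _ _ _ hq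
  · exact hq

theorem floodA_shaped (op sol : List (List Int)) (n : Nat) : Shaped n (floodA op sol n) := by
  rw [floodA_eq]
  exact foldl_inv (Shaped n) _
    (fun v i hv => foldl_inv (Shaped n) _ (fun v j hv => stepA_shaped op sol n v i j hv) _ _ hv)
    _ _ (shaped_replicate n)

theorem flood_seeds (op sol : List (List Int)) (n : Nat) :
    ∀ i j, i < n → j < n → gget op i j ≠ 0 → vget (floodA op sol n) i j = true := by
  intro i j hi hj hseed
  rw [floodA_eq]
  apply foldl_estab (Shaped n) (fun v => vget v i j = true) _ i
  · intro v x hv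
    exact foldl_inv (Shaped n) _ (fun v y hv => stepA_shaped op sol n v x y hv) _ _ hv
  · intro v x hv hq
    exact foldl_pres (Shaped n) _ _ (fun v y hv => stepA_shaped op sol n v x y hv)
      (fun v y hv hq => stepA_mono op sol n v x y _ _ hq) _ _ hv hq
  · intro v hv
    apply foldl_estab (Shaped n) (fun v => vget v i j = true) _ j
    · intro v y hv
      exact stepA_shaped op sol n v i y hv
    · intro v y hv hq
      exact stepA_mono op sol n v i y _ _ hq
    · intro v hv
      unfold stepA
      by_cases hvis : vget v i j = true
      · split
        · exact dfs_mono sol n _ _ _ _ _ _ _ hvis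
        · exact hvis
      · rw [if_pos ⟨by simpa using hvis, hseed⟩]
        have := dfs_marks sol n (gget sol i j) (n * n) (i : Int) (j : Int) v hv
          (by omega) (by omega) (by omega) (by omega) (by simp)
        simpa using this
    · exact List.mem_range.mpr hj
    · exact hv
  · exact List.mem_range.mpr hi
  · exact shaped_replicate n

-- the flood result is closed under equal-valued adjacency
def NCv (sol : List (List Int)) (n : Nat) (v : List (List Bool)) : Prop :=
  ∀ a b, a < n → b < n → vget v a b = true →
    ∀ c d, c < n → d < n → Adj a b c d → gget sol c d = gget sol a b → vget v c d = true

theorem stepA_nc (op sol : List (List Int)) (n : Nat) (v : List (List Bool)) (i j : Nat)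
    (h : Shaped n v ∧ NCv sol n v) :
    Shaped n (stepA op sol n v i j) ∧ NCv sol n (stepA op sol n v i j) := by
  obtain ⟨hsh, hnc⟩ := h
  unfold stepA
  split
  · refine ⟨dfsA_shaped sol n _ _ _ _ _ hsh, ?_⟩
    intro a b ha hb hab c d hc hd hadj hscd
    have hfc : fc n v < n * n + 1 := by have := fc_le_sq n v; omega
    rcases dfs_post sol n (gget sol i j) (n * n + 1) (i : Int) (j : Int) v hsh hfc
        a b ha hb hab with hold | ⟨hs, hn⟩
    · exact dfs_mono sol n _ _ _ _ _ _ _ (hnc a b ha hb hold c d hc hd hadj hscd)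
    · exact hn c d hc hd hadj (by rw [hscd, hs])
  · exact ⟨hsh, hnc⟩

theorem flood_nclosed (op sol : List (List Int)) (n : Nat) : NCv sol n (floodA op sol n) := by
  rw [floodA_eq]
  exact (foldl_inv (fun v => Shaped n v ∧ NCv sol n v) _
    (fun v i hv => foldl_inv _ _ (fun v j hv => stepA_nc op sol n v i j hv) _ _ hv)
    (List.range n) _
    ⟨shaped_replicate n, fun a b _ _ hab => by
      rw [vget_replicate] at hab; exact absurd hab (by simp)⟩).2

theorem A_closed (op sol : List (List Int)) (n : Nat) :
    ClosedP op sol n (fun i j => vget (floodA op sol n) i j = true) := by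
  intro i j hi hj hJ
  rcases hJ with hseed | ⟨h0, hP, hs⟩ | ⟨h0, hP, hs⟩ | ⟨h0, hP, hs⟩ | ⟨h0, hP, hs⟩
  · exact flood_seeds op sol n i j hi hj hseed
  · exact flood_nclosed op sol n (i - 1) j (by omega) hj hP i j hi hj
      (Or.inl ⟨by omega, rfl⟩) hs.symm
  · exact flood_nclosed op sol n (i + 1) j h0 hj hP i j hi hj
      (Or.inr (Or.inl ⟨by omega, rfl⟩)) hs.symm
  · exact flood_nclosed op sol n i (j - 1) hi (by omega) hP i j hi hj
      (Or.inr (Or.inr (Or.inl ⟨rfl, by omega⟩))) hs.symm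
  · exact flood_nclosed op sol n i (j + 1) hi h0 hP i j hi hj
      (Or.inr (Or.inr (Or.inr ⟨rfl, by omega⟩))) hs.symm

theorem stepA_min (op sol : List (List Int)) (n : Nat) (P : Nat → Nat → Prop)
    (hC : ClosedP op sol n P) (v : List (List Bool)) (x y : Nat)
    (hv : ∀ a b, a < n → b < n → vget v a b = true → P a b) :
    ∀ a b, a < n → b < n → vget (stepA op sol n v x y) a b = true → P a b := by
  unfold stepA
  split
  · rename_i hcond
    exact dfs_min op sol n (gget sol x y) P hC (n * n + 1) (x : Int) (y : Int) v hv
      (fun _ => Or.inl (by simpa using hcond.2))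
  · exact hv

theorem A_min (op sol : List (List Int)) (n : Nat) (P : Nat → Nat → Prop)
    (hC : ClosedP op sol n P) :
    ∀ i j, i < n → j < n → vget (floodA op sol n) i j = true → P i j := by
  intro i j hi hj h
  rw [floodA_eq] at h
  exact foldl_inv (fun v => ∀ a b, a < n → b < n → vget v a b = true → P a b) _
    (fun v x hv => foldl_inv _ _ (fun v y hv => stepA_min op sol n P hC v x y hv) _ _ hv)
    (List.range n) _
    (fun a b _ _ hab => by rw [vget_replicate] at hab; exact absurd hab (by simp))
    i j hi hj h

-- ---- flat index arithmetic ----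
theorem idx_div (n i j : Nat) (hj : j < n) : (i * n + j) / n = i := by
  rw [Nat.mul_comm i n, Nat.mul_add_div (by omega), Nat.div_eq_of_lt hj]
  omega

theorem idx_mod (n i j : Nat) (hj : j < n) : (i * n + j) % n = j := by
  rw [Nat.mul_comm i n, Nat.mul_add_mod, Nat.mod_eq_of_lt hj]

theorem idx_lt (n i j : Nat) (hi : i < n) (hj : j < n) : i * n + j < n * n := by
  calc i * n + j < i * n + n := by omega
  _ = (i + 1) * n := by ring
  _ ≤ n * n := Nat.mul_le_mul_right n (by omega)

theorem idx_inj (n i j a b : Nat) (hj : j < n) (hb : b < n) (h : a * n + b = i * n + j) :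
    a = i ∧ b = j := by
  constructor
  · have := idx_div n a b hb
    rw [h, idx_div n i j hj] at this
    omega
  · have := idx_mod n a b hb
    rw [h, idx_mod n i j hj] at this
    omega

theorem idx_recomp (n k : Nat) (h : 0 < n) : (k / n) * n + k % n = k := by
  rw [Nat.mul_comm]
  exact Nat.div_add_mod k n

-- ---- flat visited lemmas ----
theorem fj_set_self (w : List Bool) (k : Nat) (h : k < w.length) : fj (w.set k true) k = true :=
  getD_set_self w k true false h

theorem fj_set_ne (w : List Bool) (k k' : Nat) (h : k' ≠ k) : fj (w.set k true) k' = fj w k' :=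
  getD_set_ne w k true k' false h

theorem fj_set_true (w : List Bool) (k k' : Nat) (h : fj w k' = true) :
    fj (w.set k true) k' = true := by
  by_cases he : k' = k
  · subst he
    by_cases hl : k' < w.length
    · exact fj_set_self w k' hl
    · rw [List.set_eq_of_length_le (by omega)]; exact h
  · rw [fj_set_ne w k k' he]; exact h

theorem fj_replicate (m k : Nat) : fj (List.replicate m false) k = false := by
  unfold fj
  rcases Nat.lt_or_ge k m with h | h
  · simp [List.getD_eq_getElem?_getD, List.getElem?_replicate, h]
  · rw [List.getD_eq_getElem?_getD, List.getElem?_eq_none (by rw [List.length_replicate]; omega)]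
    rfl

-- ---- the sweep: counting, stability, monotonicity ----
def cntB (total : Nat) (w : List Bool) : Nat :=
  ((Finset.range total).filter (fun k => fj w k = true)).card

theorem cnt_le (total : Nat) (w : List Bool) : cntB total w ≤ total := by
  calc cntB total w ≤ (Finset.range total).card := Finset.card_filter_le _ _
  _ = total := Finset.card_range total

theorem cnt_set_lt (total : Nat) (w : List Bool) (k : Nat)
    (hk : k < total) (hl : k < w.length) (hf : fj w k = false) :
    cntB total w < cntB total (w.set k true) := by
  apply Finset.card_lt_card
  constructor
  · intro x hx
    rw [Finset.mem_filter] at hx ⊢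
    exact ⟨hx.1, fj_set_true w k x hx.2⟩
  · intro hsub
    have hmem : k ∈ (Finset.range total).filter (fun k' => fj (w.set k true) k' = true) := by
      rw [Finset.mem_filter]
      exact ⟨Finset.mem_range.mpr hk, fj_set_self w k hl⟩
    have := hsub hmem
    rw [Finset.mem_filter] at this
    rw [hf] at this
    exact absurd this.2 (by simp)

theorem sweep_len (op sol : List (List Int)) (n : Nat) :
    ∀ (l : List Nat) (p : List Bool × Bool),
      ((l.foldl (sweepStep op sol n) p).1).length = p.1.length := by
  intro l
  induction l with
  | nil => intro p; rfl
  | cons k t ih =>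
    intro p
    simp only [List.foldl_cons]
    rw [ih]
    unfold sweepStep
    split
    · simp
    · rfl

theorem sweep_persist (op sol : List (List Int)) (n : Nat) :
    ∀ (l : List Nat) (p : List Bool × Bool), p.2 = true →
      (l.foldl (sweepStep op sol n) p).2 = true := by
  intro l
  induction l with
  | nil => intro p h; exact h
  | cons k t ih =>
    intro p h
    simp only [List.foldl_cons]
    apply ih
    unfold sweepStep
    split
    · rfl
    · exact h

theorem sweep_unchanged (op sol : List (List Int)) (n : Nat) :
    ∀ (l : List Nat) (w : List Bool),
      (l.foldl (sweepStep op sol n) (w, false)).2 = false →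
      (l.foldl (sweepStep op sol n) (w, false)).1 = w ∧
        ∀ k ∈ l, fj w k = false → reachB op sol n w k = false := by
  intro l
  induction l with
  | nil => intro w _; exact ⟨rfl, by simp⟩
  | cons k t ih =>
    intro w h
    simp only [List.foldl_cons] at h ⊢
    by_cases hc : fj w k = false ∧ reachB op sol n w k = true
    · rw [show sweepStep op sol n (w, false) k = (w.set k true, true) from by
        unfold sweepStep; rw [if_pos hc]] at h
      rw [sweep_persist op sol n t _ rfl] at h
      exact absurd h (by simp)
    · have hstep : sweepStep op sol n (w, false) k = (w, false) := by
        unfold sweepStep; rw [if_neg hc]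
      rw [hstep] at h ⊢
      obtain ⟨h1, h2⟩ := ih w h
      refine ⟨h1, fun k' hk' hf => ?_⟩
      rcases List.mem_cons.mp hk' with rfl | hm
      · cases hr : reachB op sol n w k'
        · rfl
        · exact absurd ⟨hf, hr⟩ hc
      · exact h2 k' hm hf

theorem sweep_cnt (op sol : List (List Int)) (n total : Nat) :
    ∀ (l : List Nat), (∀ k ∈ l, k < total) →
      ∀ (p : List Bool × Bool), p.1.length = total →
        cntB total p.1 ≤ cntB total (l.foldl (sweepStep op sol n) p).1 ∧
          ((l.foldl (sweepStep op sol n) p).2 = true →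
            p.2 = true ∨ cntB total p.1 < cntB total (l.foldl (sweepStep op sol n) p).1) := by
  intro l
  induction l with
  | nil => intro _ p _; exact ⟨le_refl _, fun h => Or.inl h⟩
  | cons k t ih =>
    intro hmem p hlen
    simp only [List.foldl_cons]
    by_cases hc : fj p.1 k = false ∧ reachB op sol n p.1 k = true
    · have hstep : sweepStep op sol n p k = (p.1.set k true, true) := by
        unfold sweepStep; rw [if_pos hc]
      rw [hstep]
      have hk : k < total := hmem k List.mem_cons_self
      have hlt : cntB total p.1 < cntB total (p.1.set k true) :=
        cnt_set_lt total p.1 k hk (by omega) hc.1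
      obtain ⟨hle, _⟩ := ih (fun k' hk' => hmem k' (List.mem_cons_of_mem k hk'))
        (p.1.set k true, true) (by simp [hlen])
      exact ⟨le_of_lt (lt_of_lt_of_le hlt hle), fun _ => Or.inr (lt_of_lt_of_le hlt hle)⟩
    · have hstep : sweepStep op sol n p k = p := by
        unfold sweepStep; rw [if_neg hc]
      rw [hstep]
      exact ih (fun k' hk' => hmem k' (List.mem_cons_of_mem k hk')) p hlen

-- ---- the loop: length, closedness, minimality ----
theorem loopB_len (op sol : List (List Int)) (n total : Nat) :
    ∀ (f : Nat) (w : List Bool), (loopB op sol n total f w).length = w.length := by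
  intro f
  induction f with
  | zero => intro w; rfl
  | succ f ih =>
    intro w
    rw [loopB]
    split
    · rw [ih]
      exact sweep_len op sol n _ _
    · rfl

def ClosedF (op sol : List (List Int)) (n total : Nat) (w : List Bool) : Prop :=
  ∀ k, k < total → fj w k = false → reachB op sol n w k = false

theorem loopB_closed (op sol : List (List Int)) (n total : Nat) :
    ∀ (f : Nat) (w : List Bool), w.length = total → total < f + cntB total w →
      ClosedF op sol n total (loopB op sol n total f w) := by
  intro f
  induction f with
  | zero =>
    intro w _ hcnt
    have := cnt_le total w
    omega
  | succ f ih =>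
    intro w hlen hcnt
    rw [loopB]
    split
    · rename_i hp
      apply ih
      · rw [show (sweepB op sol n total w).1 =
            ((List.range total).foldl (sweepStep op sol n) (w, false)).1 from rfl,
          sweep_len op sol n]
        exact hlen
      · obtain ⟨hle, hstrict⟩ := sweep_cnt op sol n total (List.range total)
          (fun k hk => List.mem_range.mp hk) (w, false) hlen
        rcases hstrict hp with h | h
        · exact absurd h (by simp)
        · have h' : cntB total w <
              cntB total ((List.range total).foldl (sweepStep op sol n) (w, false)).1 := h
          rw [show (sweepB op sol n total w).1 =
              ((List.range total).foldl (sweepStep op sol n) (w, false)).1 from rfl]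
          omega
    · rename_i hp
      have h2 : (sweepB op sol n total w).2 = false := by
        cases h : (sweepB op sol n total w).2
        · rfl
        · exact absurd h hp
      obtain ⟨_, hcl⟩ := sweep_unchanged op sol n (List.range total) w h2
      intro k hk hf
      exact hcl k (List.mem_range.mpr hk) hf

-- reachability implies the closure-rule premise
theorem reach_to_just (op sol : List (List Int)) (n : Nat) (P : Nat → Nat → Prop)
    (w : List Bool) (k : Nat) (hk : k < n * n)
    (hIB : ∀ i j, i < n → j < n → fj w (i * n + j) = true → P i j)
    (hr : reachB op sol n w k = true) :
    JustP op sol n P (k / n) (k % n) := by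
  have hn : 0 < n := by
    rcases Nat.eq_zero_or_pos n with h | h
    · subst h; omega
    · exact h
  have hi : k / n < n := Nat.div_lt_of_lt_mul hk
  have hj : k % n < n := Nat.mod_lt k hn
  unfold reachB at hr
  simp only at hr
  split_ifs at hr with h1 h2 h3 h4 h5
  · exact Or.inl h1
  · exact Or.inr (Or.inl ⟨h2.1, hIB _ _ (by omega) hj h2.2.1, h2.2.2⟩)
  · exact Or.inr (Or.inr (Or.inl ⟨h3.1, hIB _ _ h3.1 hj h3.2.1, h3.2.2⟩))
  · exact Or.inr (Or.inr (Or.inr (Or.inl ⟨h4.1, hIB _ _ hi (by omega) h4.2.1, h4.2.2⟩)))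
  · exact Or.inr (Or.inr (Or.inr (Or.inr ⟨h5.1, hIB _ _ hi h5.1 h5.2.1, h5.2.2⟩)))

-- and conversely the closure-rule premise forces reachability
theorem just_to_reach (op sol : List (List Int)) (n : Nat) (w : List Bool) (i j : Nat)
    (hi : i < n) (hj : j < n)
    (hJ : JustP op sol n (fun a b => fj w (a * n + b) = true) i j) :
    reachB op sol n w (i * n + j) = true := by
  unfold reachB
  simp only [idx_div n i j hj, idx_mod n i j hj]
  split_ifs with h1 h2 h3 h4 h5
  · rfl
  · rfl
  · rfl
  · rfl
  · rfl
  · rcases hJ with h | h | h | h | h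
    · exact absurd h h1
    · exact absurd h h2
    · exact absurd h h3
    · exact absurd h h4
    · exact absurd h h5

theorem loopB_min (op sol : List (List Int)) (n : Nat) (P : Nat → Nat → Prop)
    (hC : ClosedP op sol n P) :
    ∀ (f : Nat) (w : List Bool),
      (∀ i j, i < n → j < n → fj w (i * n + j) = true → P i j) →
      ∀ i j, i < n → j < n → fj (loopB op sol n (n * n) f w) (i * n + j) = true → P i j := by
  have hstep : ∀ (p : List Bool × Bool) (k : Nat), k ∈ List.range (n * n) →
      (∀ i j, i < n → j < n → fj p.1 (i * n + j) = true → P i j) →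
      (∀ i j, i < n → j < n → fj (sweepStep op sol n p k).1 (i * n + j) = true → P i j) := by
    intro p k hkmem hIB i j hi hj hfj
    have hk : k < n * n := List.mem_range.mp hkmem
    unfold sweepStep at hfj
    split at hfj
    · rename_i hc
      have hfj' : fj (p.1.set k true) (i * n + j) = true := hfj
      by_cases he : i * n + j = k
      · have hJ := reach_to_just op sol n P p.1 k hk hIB hc.2
        have hdi : k / n = i := by rw [← he, idx_div n i j hj]
        have hdj : k % n = j := by rw [← he, idx_mod n i j hj]
        rw [hdi, hdj] at hJ
        exact hC i j hi hj hJ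
      · rw [fj_set_ne p.1 k _ he] at hfj'
        exact hIB i j hi hj hfj'
    · exact hIB i j hi hj hfj
  intro f
  induction f with
  | zero => intro w hIB; exact hIB
  | succ f ih =>
    intro w hIB i j hi hj h
    rw [loopB] at h
    split at h
    · exact ih _ (foldl_inv_mem (fun (p : List Bool × Bool) =>
        ∀ i j, i < n → j < n → fj p.1 (i * n + j) = true → P i j)
        (sweepStep op sol n) (List.range (n * n)) hstep (w, false) hIB) i j hi hj h
    · exact hIB i j hi hj h

-- ---- the two visited structures agree pointwise ----
theorem eqVW (op sol : List (List Int)) (n : Nat) :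
    ∀ i j, i < n → j < n →
      vget (floodA op sol n) i j =
        fj (loopB op sol n (n * n) (n * n + 1) (List.replicate (n * n) false)) (i * n + j) := by
  intro i j hi hj
  have hW := loopB_closed op sol n (n * n) (n * n + 1) (List.replicate (n * n) false)
    (by simp) (by omega)
  set W := loopB op sol n (n * n) (n * n + 1) (List.replicate (n * n) false) with hWdef
  have hBclosed : ClosedP op sol n (fun a b => fj W (a * n + b) = true) := by
    intro a b ha hb hJ
    cases hfW : fj W (a * n + b)
    · exfalso
      have hk : a * n + b < n * n := idx_lt n a b ha hb
      have hcl := hW (a * n + b) hk hfW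
      rw [just_to_reach op sol n W a b ha hb hJ] at hcl
      exact absurd hcl (by simp)
    · rfl
  have dir1 : vget (floodA op sol n) i j = true → fj W (i * n + j) = true :=
    fun h => A_min op sol n _ hBclosed i j hi hj h
  have dir2 : fj W (i * n + j) = true → vget (floodA op sol n) i j = true := by
    intro h
    exact loopB_min op sol n _ (A_closed op sol n) (n * n + 1)
      (List.replicate (n * n) false)
      (fun a b _ _ hx => by rw [fj_replicate] at hx; exact absurd hx (by simp)) i j hi hj h
  cases hA : vget (floodA op sol n) i j
  · cases hB : fj W (i * n + j)
    · rfl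
    · rw [dir2 hB] at hA; exact hA.symm
  · rw [dir1 hA]

-- ---- nested ↔ flat fold transformations ----
theorem nf1 {β : Type} (g : β → Nat → Nat → β) (n : Nat) :
    ∀ (m : Nat) (s : β),
      (List.range (m * n)).foldl (fun s k => g s (k / n) (k % n)) s =
        (List.range m).foldl (fun s i => (List.range n).foldl (fun s j => g s i j) s) s := by
  intro m
  induction m with
  | zero => intro s; simp
  | succ m ih =>
    intro s
    have hsplit : (m + 1) * n = m * n + n := by ring
    rw [hsplit, List.range_add, List.foldl_append, List.range_succ, List.foldl_append, ih]
    simp only [List.foldl_cons, List.foldl_nil]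
    rcases Nat.eq_zero_or_pos n with hn | hn
    · subst hn; simp
    · rw [List.foldl_map]
      apply foldl_congr_mem'
      intro b a ha
      have haj : a < n := List.mem_range.mp ha
      rw [show m * n + a = a + m * n from by ring]
      rw [Nat.add_mul_div_right a m hn, Nat.div_eq_of_lt haj, Nat.zero_add,
        Nat.add_mul_mod_self_right, Nat.mod_eq_of_lt haj]

theorem nf2 {β : Type} (g : β → Nat → Nat → β) (n : Nat) :
    ∀ (m : Nat) (s : β),
      ((List.range (m * n)).reverse).foldl (fun s k => g s (k / n) (k % n)) s =
        ((List.range m).reverse).foldl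
          (fun s i => ((List.range n).reverse).foldl (fun s j => g s i j) s) s := by
  intro m
  induction m with
  | zero => intro s; simp
  | succ m ih =>
    intro s
    have hsplit : (m + 1) * n = m * n + n := by ring
    rw [hsplit, List.range_add, List.reverse_append, List.foldl_append, List.range_succ,
      List.reverse_append, List.foldl_append]
    simp only [List.reverse_cons, List.reverse_nil, List.nil_append, List.foldl_cons,
      List.foldl_nil]
    rw [← List.map_reverse]
    rcases Nat.eq_zero_or_pos n with hn | hn
    · subst hn; simp [ih]
    · rw [List.foldl_map]
      have hchunk : ∀ (s : β),
          ((List.range n).reverse).foldl (fun s a => g s ((m * n + a) / n) ((m * n + a) % n)) s =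
            ((List.range n).reverse).foldl (fun s j => g s m j) s := by
        intro s
        apply foldl_congr_mem'
        intro b a ha
        have haj : a < n := List.mem_range.mp (List.mem_reverse.mp ha)
        rw [show m * n + a = a + m * n from by ring]
        rw [Nat.add_mul_div_right a m hn, Nat.div_eq_of_lt haj, Nat.zero_add,
          Nat.add_mul_mod_self_right, Nat.mod_eq_of_lt haj]
      rw [hchunk, ih]

-- ---- simulation of the patch passes ----
def RelSV (n : Nat) (u : List (List Int) × List (List Bool)) (w : List (List Int) × List Bool) : Prop :=
  u.1 = w.1 ∧ Shaped n u.2 ∧ w.2.length = n * n ∧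
    ∀ i j, i < n → j < n → vget u.2 i j = fj w.2 (i * n + j)

theorem rel_update (n : Nat) (us : List (List Int)) (uv : List (List Bool)) (wv : List Bool)
    (i j : Nat) (hi : i < n) (hj : j < n) (x : Int)
    (h2 : Shaped n uv) (h3 : wv.length = n * n)
    (h4 : ∀ a b, a < n → b < n → vget uv a b = fj wv (a * n + b)) :
    RelSV n (sset us i j x, vset uv i j) (sset us i j x, wv.set (i * n + j) true) := by
  refine ⟨rfl, shaped_vset n uv i j h2, by simp [h3], ?_⟩
  intro a b ha hb
  by_cases hab : a = i ∧ b = j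
  · obtain ⟨rfl, rfl⟩ := hab
    rw [vget_vset_self uv a b (by rw [h2.1]; omega) (by rw [h2.2 a ha]; omega),
      fj_set_self wv (a * n + b) (by rw [h3]; exact idx_lt n a b ha hb)]
  · have hne : a ≠ i ∨ b ≠ j := by tauto
    rw [vget_vset_ne uv i j a b hne,
      fj_set_ne wv (i * n + j) (a * n + b) (fun he => hab (idx_inj n i j a b hj hb he)),
      h4 a b ha hb]

theorem step1_sim (n : Nat) (u : List (List Int) × List (List Bool))
    (w : List (List Int) × List Bool) (k : Nat) (hk : k < n * n) (hR : RelSV n u w) :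
    RelSV n (a1body u (k / n) (k % n)) (step1B n w k) := by
  obtain ⟨us, uv⟩ := u
  obtain ⟨ws, wv⟩ := w
  obtain ⟨h1, h2, h3, h4⟩ := hR
  have h1' : us = ws := h1
  subst h1'
  have hn : 0 < n := by
    rcases Nat.eq_zero_or_pos n with h0 | h0
    · subst h0; omega
    · exact h0
  set i := k / n with hidef
  set j := k % n with hjdef
  have hi : i < n := Nat.div_lt_of_lt_mul hk
  have hj : j < n := Nat.mod_lt k hn
  have hkij : i * n + j = k := idx_recomp n k hn
  have hvis : vget uv i j = fj wv k := by
    have := h4 i j hi hj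
    rw [hkij] at this
    exact this
  unfold a1body step1B donor1B
  by_cases h0 : fj wv k = true
  · rw [if_pos h0, if_pos (show vget (us, uv).2 i j = true from by
      show vget uv i j = true; rw [hvis]; exact h0)]
    exact ⟨h1, h2, h3, h4⟩
  · rw [if_neg (show ¬ vget (us, uv).2 i j = true from by
      show ¬ vget uv i j = true; rw [hvis]; exact h0), if_neg h0]
    by_cases hc1 : 0 < i ∧ fj wv ((i - 1) * n + j) = true
    · have hc1A : 0 < i ∧ vget uv (i - 1) j = true :=
        ⟨hc1.1, by rw [h4 (i - 1) j (by omega) hj]; exact hc1.2⟩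
    -- donor found above
      rw [if_pos (show 0 < i ∧ vget (us, uv).2 (i - 1) j = true from hc1A),
        if_pos (show 0 < i ∧ fj (us, wv).2 ((i - 1) * n + j) = true from hc1)]
      have HU := rel_update n us uv wv i j hi hj (gget us (i - 1) j) h2 h3 h4
      rw [hkij] at HU
      exact HU
    · have hc1A : ¬ (0 < i ∧ vget uv (i - 1) j = true) := by
        intro hc
        exact hc1 ⟨hc.1, by rw [← h4 (i - 1) j (by omega) hj]; exact hc.2⟩
      rw [if_neg (show ¬ (0 < i ∧ vget (us, uv).2 (i - 1) j = true) from hc1A),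
        if_neg (show ¬ (0 < i ∧ fj (us, wv).2 ((i - 1) * n + j) = true) from hc1)]
      by_cases hc2 : 0 < j ∧ fj wv (i * n + (j - 1)) = true
      · have hc2A : 0 < j ∧ vget uv i (j - 1) = true :=
          ⟨hc2.1, by rw [h4 i (j - 1) hi (by omega)]; exact hc2.2⟩
        rw [if_pos (show 0 < j ∧ vget (us, uv).2 i (j - 1) = true from hc2A),
          if_pos (show 0 < j ∧ fj (us, wv).2 (i * n + (j - 1)) = true from hc2)]
        have HU := rel_update n us uv wv i j hi hj (gget us i (j - 1)) h2 h3 h4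
        rw [hkij] at HU
        exact HU
      · have hc2A : ¬ (0 < j ∧ vget uv i (j - 1) = true) := by
          intro hc
          exact hc2 ⟨hc.1, by rw [← h4 i (j - 1) hi (by omega)]; exact hc.2⟩
        rw [if_neg (show ¬ (0 < j ∧ vget (us, uv).2 i (j - 1) = true) from hc2A),
          if_neg (show ¬ (0 < j ∧ fj (us, wv).2 (i * n + (j - 1)) = true) from hc2)]
        exact ⟨h1, h2, h3, h4⟩

theorem step2_sim (n : Nat) (u : List (List Int) × List (List Bool))
    (w : List (List Int) × List Bool) (k : Nat) (hk : k < n * n) (hR : RelSV n u w) :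
    RelSV n (a2body n u (k / n) (k % n)) (step2B n w k) := by
  obtain ⟨us, uv⟩ := u
  obtain ⟨ws, wv⟩ := w
  obtain ⟨h1, h2, h3, h4⟩ := hR
  have h1' : us = ws := h1
  subst h1'
  have hn : 0 < n := by
    rcases Nat.eq_zero_or_pos n with h0 | h0
    · subst h0; omega
    · exact h0
  set i := k / n with hidef
  set j := k % n with hjdef
  have hi : i < n := Nat.div_lt_of_lt_mul hk
  have hj : j < n := Nat.mod_lt k hn
  have hkij : i * n + j = k := idx_recomp n k hn
  have hvis : vget uv i j = fj wv k := by
    have := h4 i j hi hj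
    rw [hkij] at this
    exact this
  unfold a2body step2B donor2B
  by_cases h0 : fj wv k = true
  · rw [if_pos h0, if_pos (show vget (us, uv).2 i j = true from by
      show vget uv i j = true; rw [hvis]; exact h0)]
    exact ⟨h1, h2, h3, h4⟩
  · rw [if_neg (show ¬ vget (us, uv).2 i j = true from by
      show ¬ vget uv i j = true; rw [hvis]; exact h0), if_neg h0]
    by_cases hc1 : i + 1 < n ∧ fj wv ((i + 1) * n + j) = true
    · have hc1A : i + 1 < n ∧ vget uv (i + 1) j = true :=
        ⟨hc1.1, by rw [h4 (i + 1) j hc1.1 hj]; exact hc1.2⟩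
      rw [if_pos (show i + 1 < n ∧ vget (us, uv).2 (i + 1) j = true from hc1A),
        if_pos (show i + 1 < n ∧ fj (us, wv).2 ((i + 1) * n + j) = true from hc1)]
      have HU := rel_update n us uv wv i j hi hj (gget us (i + 1) j) h2 h3 h4
      rw [hkij] at HU
      exact HU
    · have hc1A : ¬ (i + 1 < n ∧ vget uv (i + 1) j = true) := by
        intro hc
        exact hc1 ⟨hc.1, by rw [← h4 (i + 1) j hc.1 hj]; exact hc.2⟩
      rw [if_neg (show ¬ (i + 1 < n ∧ vget (us, uv).2 (i + 1) j = true) from hc1A),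
        if_neg (show ¬ (i + 1 < n ∧ fj (us, wv).2 ((i + 1) * n + j) = true) from hc1)]
      by_cases hc2 : j + 1 < n ∧ fj wv (i * n + (j + 1)) = true
      · have hc2A : j + 1 < n ∧ vget uv i (j + 1) = true :=
          ⟨hc2.1, by rw [h4 i (j + 1) hi hc2.1]; exact hc2.2⟩
        rw [if_pos (show j + 1 < n ∧ vget (us, uv).2 i (j + 1) = true from hc2A),
          if_pos (show j + 1 < n ∧ fj (us, wv).2 (i * n + (j + 1)) = true from hc2)]
        have HU := rel_update n us uv wv i j hi hj (gget us i (j + 1)) h2 h3 h4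
        rw [hkij] at HU
        exact HU
      · have hc2A : ¬ (j + 1 < n ∧ vget uv i (j + 1) = true) := by
          intro hc
          exact hc2 ⟨hc.1, by rw [← h4 i (j + 1) hi hc.1]; exact hc.2⟩
        rw [if_neg (show ¬ (j + 1 < n ∧ vget (us, uv).2 i (j + 1) = true) from hc2A),
          if_neg (show ¬ (j + 1 < n ∧ fj (us, wv).2 (i * n + (j + 1)) = true) from hc2)]
        exact ⟨h1, h2, h3, h4⟩

-- ---- main equality ----
theorem main_eq (op solution : List (List Int)) :
    fix_cycles op solution = fix_cycles_alt op solution := by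
  show (pass2A solution.length (pass1A solution.length
      (solution, floodA op solution solution.length))).1 =
    (((List.range (solution.length * solution.length)).reverse).foldl (step2B solution.length)
      ((List.range (solution.length * solution.length)).foldl (step1B solution.length)
        (solution, loopB op solution solution.length (solution.length * solution.length)
          (solution.length * solution.length + 1)
          (List.replicate (solution.length * solution.length) false)))).1
  set n := solution.length with hn
  set W := loopB op solution n (n * n) (n * n + 1) (List.replicate (n * n) false) with hW
  have hRel0 : RelSV n (solution, floodA op solution n) (solution, W) := by
    refine ⟨rfl, floodA_shaped op solution n, ?_, ?_⟩
    · rw [hW, loopB_len]; simp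
    · intro i j hi hj
      exact eqVW op solution n i j hi hj
  have hRel1 : RelSV n (pass1A n (solution, floodA op solution n))
      ((List.range (n * n)).foldl (step1B n) (solution, W)) := by
    have hflat : pass1A n (solution, floodA op solution n) =
        (List.range (n * n)).foldl (fun sv k => a1body sv (k / n) (k % n))
          (solution, floodA op solution n) := by
      rw [nf1 (fun sv i j => a1body sv i j) n n]
      rfl
    rw [hflat]
    exact foldl_rel (RelSV n) _ _ (List.range (n * n))
      (fun u w k hk hr => step1_sim n u w k (List.mem_range.mp hk) hr) _ _ hRel0
  have hRel2 : RelSV n (pass2A n (pass1A n (solution, floodA op solution n)))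
      (((List.range (n * n)).reverse).foldl (step2B n)
        ((List.range (n * n)).foldl (step1B n) (solution, W))) := by
    have hflat : pass2A n (pass1A n (solution, floodA op solution n)) =
        ((List.range (n * n)).reverse).foldl (fun sv k => a2body n sv (k / n) (k % n))
          (pass1A n (solution, floodA op solution n)) := by
      rw [nf2 (fun sv i j => a2body n sv i j) n n]
      rfl
    rw [hflat]
    exact foldl_rel (RelSV n) _ _ ((List.range (n * n)).reverse)
      (fun u w k hk hr =>
        step2_sim n u w k (List.mem_range.mp (List.mem_reverse.mp hk)) hr) _ _ hRel1
  exact hRel2.1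

-- ===== VERDICT (by name: the statement is the Claim_ definition above) =====
theorem fix_cycles_spec : Claim_equal_fix_cycles := by
  intro original_puzzle solution _ _
  unfold Spec_fix_cycles
  exact main_eq original_puzzle solution
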